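-- pv_equiv track=rewrite | github.com/MateusHSAraujo/MC102-2s2020 | lists/lista5exercício9.py | verificaestradaschegamasnaosai
-- ===== SOURCE A (Python) =====
-- def verificamatriz(listabi):
--     matriz=True
--     for linha in listabi:
--         if matriz == False:
--             break
--         for outralinha in listabi:
--             if len(linha)!= len(outralinha):
--                 matriz=False
--                 break
--     if matriz == True:
--         linhas= len(listabi)
--         colunas= len(listabi[0])
--         return (linhas,colunas)
--     else:
--         return ()
--
-- def transpormatriz(matriz):
--     mt=[[0 for i in range(len(matriz))] for j in range(len(matriz[0]))]
--     (nlinhas,ncolunas)=verificamatriz(matriz)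
--     for i in range(nlinhas):
--         for j in  range(ncolunas):
--             valor = matriz[i][j]
--             mt[j][i] = valor
--     return mt
--
-- def verificaestradaschegamasnaosai(mat):
--     matt=transpormatriz(mat)
--     temestradaschegando=[]
--     naotemestradasaindo=[]
--     for linhat in matt:
--         if sum(linhat) != 0:
--             temestradaschegando.append(1)
--         else:
--             temestradaschegando.append(0)
--     for linha in mat:
--         if sum(linha) != 0:
--             naotemestradasaindo.append(0)
--         else:
--             naotemestradasaindo.append(1)
--     resposta=[]
--     for a in range(len(mat)):
--         for b in range(len(mat)):
--             if a==b:
--                 if temestradaschegando[a] + naotemestradasaindo[a]==2: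
--                     resposta.append(True)
--                 else:
--                     resposta.append(False)
--     return resposta
-- ===== SOURCE B (Python) =====
-- def verificaestradaschegamasnaosai(mat):
--     n = len(mat)
--     return [sum(row[i] for row in mat) != 0 and sum(mat[i]) == 0
--             for i in range(n)]
-- ===== Notes on version B (the rewrite author's own statement) =====
-- stated objective: simpler
-- what changed: Dropped the transpose helper, the two 0/1 bookkeeping lists and the quadratic a/b diagonal loop; one comprehension per node computes the column sum directly and the row sum — no intermediate matrices or lists are built.
import Mathlib
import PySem

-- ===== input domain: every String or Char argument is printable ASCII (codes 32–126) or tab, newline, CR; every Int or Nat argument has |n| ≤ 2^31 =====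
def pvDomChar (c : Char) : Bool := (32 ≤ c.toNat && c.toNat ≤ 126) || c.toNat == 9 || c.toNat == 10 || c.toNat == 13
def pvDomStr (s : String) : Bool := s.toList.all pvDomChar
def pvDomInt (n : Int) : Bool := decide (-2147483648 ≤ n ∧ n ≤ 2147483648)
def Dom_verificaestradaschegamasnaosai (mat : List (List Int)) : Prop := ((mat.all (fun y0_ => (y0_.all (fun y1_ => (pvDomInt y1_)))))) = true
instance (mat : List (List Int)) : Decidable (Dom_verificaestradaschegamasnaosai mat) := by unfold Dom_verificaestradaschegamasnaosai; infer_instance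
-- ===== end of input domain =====

-- B replaces A's transpose helper, 0/1 bookkeeping lists and quadratic diagonal loop by one
-- comprehension per node (direct column scan); equivalence is about the return value only.

-- ===== PORT A =====
-- verificamatriz: returns some (rows, cols) when the flag stays True and listabi[0] exists;
-- none where Python raises downstream (empty list → IndexError, ragged → () then ValueError unpacking).
def pvVerificamatriz (listabi : List (List Int)) : Option (Nat × Nat) :=
  let matriz := listabi.foldl (fun m linha =>
    if m = false then m
    else listabi.foldl (fun m2 outralinha =>
      if m2 = false then m2
      else if linha.length ≠ outralinha.length then false else m2) m) true
  if matriz = true then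
    match listabi with
    | [] => none
    | r0 :: _ => some (listabi.length, r0.length)
  else none

-- transpormatriz: none exactly where Python raises (empty matrix / ragged matrix).
-- Indexing inside the i/j loop is by getD: whenever the loop runs (some-case), the matrix is
-- rectangular and every index is in range, so getD/set are exact there.
def pvTranspormatriz (matriz : List (List Int)) : Option (List (List Int)) :=
  match matriz with
  | [] => none
  | r0 :: _ =>
    let mt0 := (List.range r0.length).map (fun _ => (List.range matriz.length).map (fun _ => (0 : Int)))
    match pvVerificamatriz matriz with
    | none => none
    | some (nl, nc) =>
      some ((List.range nl).foldl (fun mt i =>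
        (List.range nc).foldl (fun mt2 j =>
          mt2.set j (((mt2.getD j []).set i ((matriz.getD i []).getD j 0)))) mt) mt0)

def verificaestradaschegamasnaosai (mat : List (List Int)) : List Bool :=
  match pvTranspormatriz mat with
  | none => []   -- Python raises here; excluded by Pre_
  | some matt =>
    let temestradaschegando := matt.map (fun linhat => if linhat.sum ≠ 0 then (1 : Int) else 0)
    let naotemestradasaindo := mat.map (fun linha => if linha.sum ≠ 0 then (0 : Int) else 1)
    (List.range mat.length).foldl (fun resposta a =>
      (List.range mat.length).foldl (fun resp b =>
        if a = b then
          resp ++ [decide (temestradaschegando.getD a 0 + naotemestradasaindo.getD a 0 = 2)]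
        else resp) resposta) []

-- ===== PORT B =====
def verificaestradaschegamasnaosai_alt (mat : List (List Int)) : List Bool :=
  (List.range mat.length).map (fun (i : Nat) =>
    decide ((mat.foldl (fun s row => s + PySem.List.pyGetD row (i : Int) 0) 0) ≠ 0)
    && decide ((PySem.List.pyGetD mat (i : Int) []).sum = 0))

-- ===== PRECONDITION & SPEC =====
-- Pre_ is exactly where Python A returns: nonempty, rectangular, and rows ≤ cols (otherwise A
-- raises IndexError/ValueError in its helpers or when indexing temestradaschegando[a]).
def Pre_verificaestradaschegamasnaosai (mat : List (List Int)) : Prop :=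
  mat ≠ [] ∧ (∀ row ∈ mat, row.length = (mat.headD []).length) ∧ mat.length ≤ (mat.headD []).length

instance (mat : List (List Int)) : Decidable (Pre_verificaestradaschegamasnaosai mat) := by
  unfold Pre_verificaestradaschegamasnaosai; infer_instance

def pvWitness_verificaestradaschegamasnaosai : List (List Int) := [[0, 1], [0, 0]]

def Spec_verificaestradaschegamasnaosai (mat : List (List Int)) (out : List Bool) : Prop :=
  out = verificaestradaschegamasnaosai_alt mat
instance (mat : List (List Int)) (out : List Bool) : Decidable (Spec_verificaestradaschegamasnaosai mat out) := by
  unfold Spec_verificaestradaschegamasnaosai; infer_instance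

-- ===== CLAIM (what is proved, stated in full; the proofs are below) =====
def Claim_equal_verificaestradaschegamasnaosai : Prop :=
  ∀ (mat : List (List Int)), Dom_verificaestradaschegamasnaosai mat →
    Pre_verificaestradaschegamasnaosai mat →
    Spec_verificaestradaschegamasnaosai mat (verificaestradaschegamasnaosai mat)

-- ===== LEMMAS AND PROOFS =====

-- verificamatriz's inner flag loop is the identity when the matrix is rectangular
lemma pvInnerFlag (linha : List Int) (c : Nat) (hl : linha.length = c) :
    ∀ (l : List (List Int)), (∀ o ∈ l, o.length = c) → ∀ m : Bool,
      l.foldl (fun m2 outralinha =>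
        if m2 = false then m2
        else if linha.length ≠ outralinha.length then false else m2) m = m := by
  intro l
  induction l with
  | nil => intro _ m; rfl
  | cons o t ih =>
    intro h m
    have ho : o.length = c := h o (by simp)
    simp only [List.foldl_cons]
    have : (if m = false then m else if linha.length ≠ o.length then false else m) = m := by
      rw [hl, ho]; simp
    rw [this]
    exact ih (fun x hx => h x (List.mem_cons_of_mem _ hx)) m

lemma pvOuterFlag (L : List (List Int)) (c : Nat) (hL : ∀ o ∈ L, o.length = c) :
    ∀ (l : List (List Int)), (∀ x ∈ l, x.length = c) → ∀ m : Bool,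
      l.foldl (fun m linha =>
        if m = false then m
        else L.foldl (fun m2 outralinha =>
          if m2 = false then m2
          else if linha.length ≠ outralinha.length then false else m2) m) m = m := by
  intro l
  induction l with
  | nil => intro _ m; rfl
  | cons x t ih =>
    intro h m
    simp only [List.foldl_cons]
    have hstep : (if m = false then m
        else L.foldl (fun m2 outralinha =>
          if m2 = false then m2
          else if x.length ≠ outralinha.length then false else m2) m) = m := by
      by_cases hm : m = false
      · simp [hm]
      · rw [if_neg hm, pvInnerFlag x c (h x (by simp)) L hL m]
    rw [hstep]
    exact ih (fun y hy => h y (List.mem_cons_of_mem _ hy)) m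

lemma pvVerificamatriz_eq (mat : List (List Int)) (c : Nat)
    (hne : mat ≠ []) (hrect : ∀ row ∈ mat, row.length = c) (hc : (mat.headD []).length = c) :
    pvVerificamatriz mat = some (mat.length, c) := by
  unfold pvVerificamatriz
  rw [pvOuterFlag mat c hrect mat hrect true]
  cases mat with
  | nil => exact absurd rfl hne
  | cons r0 t => simp at hc ⊢; omega

-- folds of index-sets preserve length
lemma pvFoldSetRowLen {α : Type} (w : Nat → α) :
    ∀ (js : List Nat) (r : List α), (js.foldl (fun r' j => r'.set j (w j)) r).length = r.length := by
  intro js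
  induction js with
  | nil => intro r; rfl
  | cons j t ih => intro r; simp only [List.foldl_cons]; rw [ih]; simp

-- fold of sets: resulting entry
lemma pvFoldSetRowGet {α : Type} [Inhabited α] (w : Nat → α) :
    ∀ (js : List Nat) (r : List α), (∀ j ∈ js, j < r.length) → ∀ j0 : Nat,
      (js.foldl (fun r' j => r'.set j (w j)) r).getD j0 default
        = if j0 ∈ js then w j0 else r.getD j0 default := by
  intro js
  induction js with
  | nil => intro r _ j0; simp
  | cons j t ih =>
    intro r h j0
    simp only [List.foldl_cons]
    have hlen : (r.set j (w j)).length = r.length := by simp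
    have ih' := ih (r.set j (w j)) (by intro x hx; rw [hlen]; exact h x (List.mem_cons_of_mem _ hx)) j0
    rw [ih']
    by_cases ht : j0 ∈ t
    · simp [ht]
    · by_cases hj : j0 = j
      · subst hj
        have : (r.set j0 (w j0)).getD j0 default = w j0 := by
          rw [List.getD_eq_getElem?_getD, List.getElem?_set_self (by exact h j0 (by simp))]
          simp
        rw [if_neg ht, this, if_pos (by simp)]
      · have : (r.set j (w j)).getD j0 default = r.getD j0 default := by
          rw [List.getD_eq_getElem?_getD, List.getElem?_set_ne (by omega)]
          rw [List.getD_eq_getElem?_getD]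
        rw [if_neg ht, this, if_neg (by simp [ht, hj])]

-- the inner transpose loop (which reads the row it is about to set): row j0 of the result
lemma pvInnerSelfLen (i : Nat) (g : Nat → Int) :
    ∀ (js : List Nat) (mt : List (List Int)),
      (js.foldl (fun mt2 j => mt2.set j ((mt2.getD j []).set i (g j))) mt).length = mt.length := by
  intro js
  induction js with
  | nil => intro mt; rfl
  | cons j t ih => intro mt; simp only [List.foldl_cons]; rw [ih]; simp

lemma pvInnerSelfGet (i : Nat) (g : Nat → Int) :
    ∀ (js : List Nat) (mt : List (List Int)), (∀ j ∈ js, j < mt.length) → ∀ j0 : Nat,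
      (js.foldl (fun mt2 j => mt2.set j ((mt2.getD j []).set i (g j))) mt).getD j0 []
        = if j0 ∈ js then (mt.getD j0 []).set i (g j0) else mt.getD j0 [] := by
  intro js
  induction js with
  | nil => intro mt _ j0; simp
  | cons j t ih =>
    intro mt h j0
    simp only [List.foldl_cons]
    have hj : j < mt.length := h j (by simp)
    set r := (mt.getD j []).set i (g j) with hr
    have hlen : (mt.set j r).length = mt.length := by simp
    rw [ih (mt.set j r) (by intro x hx; rw [hlen]; exact h x (List.mem_cons_of_mem _ hx)) j0]
    have hset_self : (mt.set j r).getD j [] = r := by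
      rw [List.getD_eq_getElem?_getD, List.getElem?_set_self hj]; simp
    have hset_ne : j0 ≠ j → (mt.set j r).getD j0 [] = mt.getD j0 [] := by
      intro hne
      rw [List.getD_eq_getElem?_getD, List.getElem?_set_ne (by omega), List.getD_eq_getElem?_getD]
    by_cases ht : j0 ∈ t
    · rw [if_pos ht, if_pos (List.mem_cons_of_mem _ ht)]
      by_cases hjj : j0 = j
      · subst hjj; rw [hset_self, hr, List.set_set]
      · rw [hset_ne hjj]
    · rw [if_neg ht]
      by_cases hjj : j0 = j
      · subst hjj; rw [hset_self, if_pos (by simp)]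
      · rw [hset_ne hjj, if_neg (by simp [hjj, ht])]

-- outer transpose loop: row j0 of the final matrix is a fold of sets over the i's
lemma pvOuterTransGet (c : Nat) (g : Nat → Nat → Int) :
    ∀ (is_ : List Nat) (mt : List (List Int)), mt.length = c → ∀ j0 : Nat, j0 < c →
      ((is_.foldl (fun mt i =>
          (List.range c).foldl (fun mt2 j => mt2.set j ((mt2.getD j []).set i (g i j))) mt) mt).getD j0 [])
        = is_.foldl (fun row i => row.set i (g i j0)) (mt.getD j0 []) := by
  intro is_
  induction is_ with
  | nil => intro mt _ j0 _; rfl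
  | cons i t ih =>
    intro mt hlen j0 hj0
    simp only [List.foldl_cons]
    have hjs : ∀ j ∈ List.range c, j < mt.length := by intro j hj; rw [hlen]; exact List.mem_range.mp hj
    have hstep : ((List.range c).foldl (fun mt2 j => mt2.set j ((mt2.getD j []).set i (g i j))) mt).length = c := by
      rw [pvInnerSelfLen i (g i), hlen]
    rw [ih _ hstep j0 hj0]
    congr 1
    rw [pvInnerSelfGet i (g i) (List.range c) mt hjs j0, if_pos (List.mem_range.mpr hj0)]

-- getD of a mapped list, in range
lemma pvGetD_map {α β : Type} (f : α → β) (l : List α) (k : Nat) (hk : k < l.length) (db : β) (da : α) :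
    (l.map f).getD k db = f (l.getD k da) := by
  rw [List.getD_eq_getElem?_getD, List.getElem?_map, List.getD_eq_getElem?_getD,
      List.getElem?_eq_getElem hk]
  simp

-- a list equals the range-map of its getD entries
lemma pvList_eq_range_map {α : Type} (l : List α) (d : α) :
    l = (List.range l.length).map (fun i => l.getD i d) := by
  apply List.ext_getElem
  · simp
  · intro i h1 h2
    simp only [List.getElem_map, List.getElem_range]
    rw [List.getD_eq_getElem?_getD, List.getElem?_eq_getElem h1]
    simp

-- the diagonal loop: the inner b-loop appends exactly one entry
lemma pvDiagInner {α : Type} (a : Nat) (e : α) :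
    ∀ (bs : List Nat), bs.Nodup → ∀ (acc : List α),
      bs.foldl (fun resp b => if a = b then resp ++ [e] else resp) acc
        = if a ∈ bs then acc ++ [e] else acc := by
  intro bs
  induction bs with
  | nil => intro _ acc; simp
  | cons b t ih =>
    intro hnd acc
    simp only [List.foldl_cons]
    rcases List.nodup_cons.mp hnd with ⟨hb, hnd'⟩
    by_cases hab : a = b
    · subst hab
      rw [if_pos rfl, ih hnd' (acc ++ [e]), if_neg (by exact hb), if_pos (by simp)]
    · rw [if_neg hab, ih hnd' acc]
      by_cases hat : a ∈ t
      · simp [hat]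
      · simp [hat, Ne.symm, hab]

-- sum via foldl with an accumulator
lemma pvFoldlAddSum {α : Type} (g : α → Int) :
    ∀ (l : List α) (s : Int), l.foldl (fun s row => s + g row) s = s + (l.map g).sum := by
  intro l
  induction l with
  | nil => intro s; simp
  | cons x t ih => intro s; simp only [List.foldl_cons, List.map_cons, List.sum_cons]; rw [ih]; ring

-- the per-node boolean of A equals B's
lemma pvCellEq (col row : Int) :
    decide ((if col ≠ 0 then (1 : Int) else 0) + (if row ≠ 0 then (0 : Int) else 1) = 2)
      = (decide (col ≠ 0) && decide (row = 0)) := by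
  by_cases hc : col = 0 <;> by_cases hr : row = 0 <;> simp [hc, hr]

-- ===== VERDICT (by name: the statement is the Claim_ definition above) =====
theorem verificaestradaschegamasnaosai_spec : Claim_equal_verificaestradaschegamasnaosai := by
  intro mat _ hpre
  obtain ⟨hne, hrect, hnc⟩ := hpre
  unfold Spec_verificaestradaschegamasnaosai
  set c := (mat.headD []).length with hc
  set n := mat.length with hn
  have hrect' : ∀ row ∈ mat, row.length = c := hrect
  -- column entry function
  set g : Nat → Nat → Int := fun i j => (mat.getD i []).getD j 0 with hg
  -- A's transpose computes
  have hver := pvVerificamatriz_eq mat c hne hrect' rfl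
  obtain ⟨r0, rest, hmat⟩ : ∃ r0 rest, mat = r0 :: rest := by
    cases mat with
    | nil => exact absurd rfl hne
    | cons a b => exact ⟨a, b, rfl⟩
  have hr0c : r0.length = c := by rw [hmat] at hc; simpa using hc.symm
  -- the transpose result
  have htrans : pvTranspormatriz mat
      = some ((List.range n).foldl (fun mt i =>
          (List.range c).foldl (fun mt2 j => mt2.set j ((mt2.getD j []).set i (g i j))) mt)
          ((List.range c).map (fun _ => (List.range n).map (fun _ => (0 : Int))))) := by
    conv_lhs => rw [hmat]
    unfold pvTranspormatriz
    rw [← hmat, hver]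
    simp only [hmat, hr0c]
    rw [← hmat]
  set mt0 : List (List Int) := (List.range c).map (fun _ => (List.range n).map (fun _ => (0 : Int))) with hmt0
  set matt := (List.range n).foldl (fun mt i =>
      (List.range c).foldl (fun mt2 j => mt2.set j ((mt2.getD j []).set i (g i j))) mt) mt0 with hmatt
  -- row j0 of matt for j0 < c
  have hmt0len : mt0.length = c := by simp [hmt0]
  have hmattrow : ∀ j0 : Nat, j0 < c →
      matt.getD j0 [] = (List.range n).map (fun i => g i j0) := by
    intro j0 hj0
    rw [hmatt, pvOuterTransGet c g (List.range n) mt0 hmt0len j0 hj0]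
    have hrow0 : mt0.getD j0 [] = (List.range n).map (fun _ => (0 : Int)) := by
      rw [hmt0, List.getD_eq_getElem?_getD, List.getElem?_map,
          List.getElem?_eq_getElem (by simpa using hj0)]
      simp
    rw [hrow0]
    -- fold of sets over range n starting from an n-length zero row
    have hlen0 : ((List.range n).map (fun _ => (0 : Int))).length = n := by simp
    apply List.ext_getElem
    · rw [pvFoldSetRowLen (fun i => g i j0) (List.range n)]; simp
    · intro i h1 h2
      have hin : i < n := by simpa using h2
      have := pvFoldSetRowGet (fun i => g i j0) (List.range n)
        ((List.range n).map (fun _ => (0 : Int)))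
        (by intro x hx; rw [hlen0]; exact List.mem_range.mp hx) i
      rw [if_pos (List.mem_range.mpr hin)] at this
      rw [List.getD_eq_getElem?_getD, List.getElem?_eq_getElem h1] at this
      simp only [Option.getD_some] at this
      simp only [this, List.getElem_map, List.getElem_range]
  -- unfold A
  unfold verificaestradaschegamasnaosai
  rw [htrans]
  simp only
  -- the diagonal double loop
  set ch := matt.map (fun linhat => if linhat.sum ≠ 0 then (1 : Int) else 0) with hch
  set ns := mat.map (fun linha => if linha.sum ≠ 0 then (0 : Int) else 1) with hns
  have hmattlen : matt.length = c := by
    rw [hmatt]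
    have : ∀ (is_ : List Nat) (mt : List (List Int)),
        ((is_.foldl (fun mt i =>
          (List.range c).foldl (fun mt2 j => mt2.set j ((mt2.getD j []).set i (g i j))) mt) mt)).length
          = mt.length := by
      intro is_
      induction is_ with
      | nil => intro mt; rfl
      | cons i t ih =>
        intro mt
        simp only [List.foldl_cons]
        rw [ih, pvInnerSelfLen i (g i)]
    rw [this, hmt0len]
  have houter : (List.range n).foldl (fun resposta a =>
      (List.range n).foldl (fun resp b =>
        if a = b then resp ++ [decide (ch.getD a 0 + ns.getD a 0 = 2)] else resp) resposta) []
      = [] ++ (List.range n).map (fun a => decide (ch.getD a 0 + ns.getD a 0 = 2)) := by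
    rw [← PySem.List.foldl_append_singleton_eq_map]
    apply PySem.List.foldl_congr_mem
    intro acc a ha
    rw [pvDiagInner a _ (List.range n) List.nodup_range acc, if_pos ha]
  rw [← hn, houter, List.nil_append]
  -- unfold B and compare pointwise
  unfold verificaestradaschegamasnaosai_alt
  rw [← hn]
  apply List.ext_getElem
  · simp
  · intro k h1 h2
    simp only [List.getElem_map, List.getElem_range]
    have hkn : k < n := by simpa using h1
    have hkc : k < c := lt_of_lt_of_le hkn hnc
    -- A side values
    have hchk : ch.getD k 0 = if ((List.range n).map (fun i => g i k)).sum ≠ 0 then (1 : Int) else 0 := by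
      rw [hch, pvGetD_map _ matt k (by omega) 0 [], hmattrow k hkc]
    have hnsk : ns.getD k 0 = if (mat.getD k []).sum ≠ 0 then (0 : Int) else 1 := by
      rw [hns, pvGetD_map _ mat k (by omega) 0 []]
    rw [hchk, hnsk]
    -- B side values
    rw [PySem.List.pyGetD_natCast mat k []]
    have hfold : mat.foldl (fun s row => s + PySem.List.pyGetD row (k : Int) 0) 0
        = ((List.range n).map (fun i => g i k)).sum := by
      have : mat.foldl (fun s row => s + PySem.List.pyGetD row (k : Int) 0) 0
          = (mat.map (fun row => row.getD k 0)).sum := by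
        simp only [PySem.List.pyGetD_natCast]
        rw [pvFoldlAddSum (fun row => row.getD k 0) mat 0]; ring
      rw [this]
      congr 1
      conv_lhs => rw [pvList_eq_range_map mat []]
      rw [List.map_map, ← hn]
      rfl
    rw [hfold]
    exact pvCellEq _ _
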